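-- pv_equiv track=rewrite | github.com/kazeichev/computer_science | Intro_To_Python_And_Algorithms/level_21.py | transform
-- ===== SOURCE A (Python) =====
-- def transform(a):
--     b = list()
--
--     for i in range(0, len(a)):
--         for j in range(0, len(a) - i - 1):
--             sub = a[j:i + j]
--             if sub:
--                 b.append(max(sub))
--
--     return b
-- ===== SOURCE B (Python) =====
-- def transform(a):
--     # DP on window size: each row of window maxima is derived from the previous
--     # row in O(1) per entry (max of previous max and the new right element),
--     # O(n^2) total instead of A's O(n^3) rescan of every slice.
--     n = len(a)
--     b = []
--     row = a[:n - 2] if n >= 2 else []   # size-1 windows a[j:j+1], j = 0..n-3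
--     i = 1
--     while row:
--         b += row
--         row = [max(row[j], a[j + i]) for j in range(len(row) - 1)]
--         i += 1
--     return b
-- ===== Notes on version B (the rewrite author's own statement) =====
-- stated objective: faster
-- what changed: Replaces A's rescan of every slice (O(n^3)) by a dynamic program over window sizes: each row of window maxima is obtained from the previous row with one max per entry, O(n^2) total.
import Mathlib
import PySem

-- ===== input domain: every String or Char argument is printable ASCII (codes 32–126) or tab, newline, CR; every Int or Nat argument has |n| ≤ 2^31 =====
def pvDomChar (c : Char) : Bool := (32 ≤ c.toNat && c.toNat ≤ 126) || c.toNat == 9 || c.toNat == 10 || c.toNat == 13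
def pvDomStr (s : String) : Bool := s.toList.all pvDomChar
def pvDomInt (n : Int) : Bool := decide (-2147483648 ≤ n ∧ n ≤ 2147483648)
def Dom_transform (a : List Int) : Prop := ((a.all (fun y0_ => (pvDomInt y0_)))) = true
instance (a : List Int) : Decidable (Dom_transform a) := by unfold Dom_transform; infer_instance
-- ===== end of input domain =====

-- B replaces A's O(n^3) rescan of every slice by an O(n^2) dynamic program over
-- window sizes: each row of window maxima comes from the previous row with one max per entry.

-- ===== PORT A =====
def transform (a : List Int) : List Int :=
  (PySem.List.pyRange 0 (PySem.List.len a)).foldl (fun b i =>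
    (PySem.List.pyRange 0 (PySem.List.len a - i - 1)).foldl (fun b j =>
      let sub := PySem.List.slice a (some j) (some (i + j))
      if sub ≠ [] then b ++ [(PySem.List.max? sub id).getD 0] else b) b) []

-- ===== PORT B =====
def transformAltLoop (a row : List Int) (i : Int) (b : List Int) : List Int :=
  if _hrow : row = [] then b
  else
    transformAltLoop a
      ((List.range (row.length - 1)).map (fun (j : Nat) =>
        max (PySem.List.pyGetD row ((j : Int)) 0) (PySem.List.pyGetD a ((j : Int) + i) 0)))
      (i + 1) (b ++ row)
termination_by row.length
decreasing_by
  have h1 : row.length ≠ 0 := fun hc => _hrow (List.eq_nil_of_length_eq_zero hc)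
  simp only [List.length_map, List.length_range]
  omega

def transform_alt (a : List Int) : List Int :=
  let n := PySem.List.len a
  let row := if 2 ≤ n then PySem.List.slice a none (some (n - 2)) else []
  transformAltLoop a row 1 []

-- ===== PRECONDITION & SPEC =====
def Spec_transform (a : List Int) (out : List Int) : Prop := out = transform_alt a
instance (a : List Int) (out : List Int) : Decidable (Spec_transform a out) := by unfold Spec_transform; infer_instance

-- ===== CLAIM (what is proved, stated in full; the proofs are below) =====
def Claim_equal_transform : Prop := ∀ (a : List Int), Dom_transform a → Spec_transform a (transform a)

-- ===== LEMMAS AND PROOFS =====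

/-- Max of the window of size `k` starting at `j` (as A computes it). -/
def winMax (a : List Int) (j k : Nat) : Int :=
  (PySem.List.max? ((a.drop j).take k) id).getD 0

/-- Row of size-`k` window maxima that A emits for outer index `k ≥ 1`. -/
def rowS (a : List Int) (k : Nat) : List Int :=
  (List.range (a.length - k - 1)).map (fun j => winMax a j k)

lemma max?_snoc (xs : List Int) (y : Int) (h : xs ≠ []) :
    (PySem.List.max? (xs ++ [y]) id).getD 0 = max ((PySem.List.max? xs id).getD 0) y := by
  obtain ⟨m, hm⟩ : ∃ m, PySem.List.max? xs id = some m := by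
    cases hx : PySem.List.max? xs id with
    | none => exact absurd ((PySem.List.max?_eq_none_iff xs id).1 hx) h
    | some m => exact ⟨m, rfl⟩
  simp only [PySem.List.max?] at hm ⊢
  rw [List.foldl_append, hm]
  simp only [List.foldl, Option.getD_some]
  split_ifs with h2
  · simp only [Option.getD_some]
    exact (max_eq_right (le_of_lt h2)).symm
  · simp only [Option.getD_some]
    exact (max_eq_left (not_lt.1 h2)).symm

lemma winMax_one (a : List Int) (j : Nat) (h : j < a.length) :
    winMax a j 1 = a.getD j 0 := by
  have hd : a.drop j = a[j] :: a.drop (j + 1) := List.drop_eq_getElem_cons h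
  unfold winMax
  rw [hd]
  simp only [List.take_succ_cons, List.take_zero]
  simp only [PySem.List.max?, List.foldl, Option.getD_some]
  exact (List.getD_eq_getElem a 0 h).symm

lemma winMax_succ (a : List Int) (j k : Nat) (hk : 1 ≤ k) (h : j + k < a.length) :
    winMax a j (k + 1) = max (winMax a j k) (a.getD (j + k) 0) := by
  have hlt : k < (a.drop j).length := by rw [List.length_drop]; omega
  have ht : (a.drop j).take (k + 1) = (a.drop j).take k ++ [a[j + k]'h] := by
    rw [List.take_add_one]
    have : (a.drop j)[k]? = some (a[j + k]'h) := by
      rw [List.getElem?_drop]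
      exact List.getElem?_eq_getElem (by omega)
    simp [this]
  have hne : (a.drop j).take k ≠ [] := by
    have : ((a.drop j).take k).length = min k (a.length - j) := by simp
    intro hc
    rw [hc] at this
    simp at this
    omega
  rw [winMax, ht, max?_snoc _ _ hne]
  rw [List.getD_eq_getElem a 0 h]
  rfl

lemma take_eq_rowS_one (a : List Int) :
    a.take (a.length - 2) = rowS a 1 := by
  apply List.ext_getElem
  · simp [rowS]
    omega
  · intro i h1 h2
    have hi : i < a.length - 2 := by simp [rowS] at h2; omega
    have hia : i < a.length := by omega
    simp only [rowS, List.getElem_take, List.getElem_map, List.getElem_range]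
    rw [winMax_one a i hia, List.getD_eq_getElem a 0 hia]

lemma row_step (a : List Int) (k : Nat) (hk : 1 ≤ k) (h2 : k + 2 ≤ a.length) :
    (List.range ((rowS a k).length - 1)).map (fun (j : Nat) =>
      max (PySem.List.pyGetD (rowS a k) ((j : Int)) 0) (PySem.List.pyGetD a ((j : Int) + (k : Int)) 0))
    = rowS a (k + 1) := by
  have hlen : (rowS a k).length = a.length - k - 1 := by simp [rowS]
  rw [hlen]
  have hr : a.length - k - 1 - 1 = a.length - (k + 1) - 1 := by omega
  rw [hr]
  unfold rowS
  apply List.map_congr_left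
  intro j hj
  rw [List.mem_range] at hj
  have hj1 : j < a.length - k - 1 := by omega
  have hcast : (j : Int) + (k : Int) = ((j + k : Nat) : Int) := by push_cast; ring
  rw [hcast, PySem.List.pyGetD_natCast, PySem.List.pyGetD_natCast]
  rw [PySem.List.getD_map_range _ _ _ _ hj1]
  rw [winMax_succ a j k hk (by omega)]

lemma altLoop_eq (a : List Int) : ∀ (d k : Nat), 1 ≤ k → a.length - k = d → ∀ b : List Int,
    transformAltLoop a (rowS a k) (k : Int) b
      = b ++ (List.range (a.length - k)).flatMap (fun t => rowS a (k + t)) := by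
  intro d
  induction d with
  | zero =>
    intro k hk hd b
    have hrow : rowS a k = [] := by simp [rowS]; omega
    rw [hrow, transformAltLoop]
    simp [hd]
  | succ d ih =>
    intro k hk hd b
    by_cases hrow : rowS a k = []
    · have hlen : a.length - k - 1 = 0 := by
        have := congrArg List.length hrow
        simpa [rowS] using this
      have hd1 : a.length - k = 1 := by omega
      rw [hrow, transformAltLoop]
      simp [hd1, hrow]
    · have hlen : 1 ≤ a.length - k - 1 := by
        rcases Nat.eq_zero_or_pos (a.length - k - 1) with h0 | h0
        · exact absurd (by simp [rowS, h0]) hrow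
        · omega
      have hk2 : k + 2 ≤ a.length := by omega
      rw [transformAltLoop]
      simp only [hrow, dite_false]
      rw [row_step a k hk hk2]
      have hc1 : (k : Int) + 1 = ((k + 1 : Nat) : Int) := by push_cast; ring
      rw [hc1, ih (k + 1) (by omega) (by omega) (b ++ rowS a k)]
      have hrange : a.length - k = (a.length - (k + 1)) + 1 := by omega
      rw [hrange, List.range_succ_eq_map]
      rw [List.flatMap_cons, List.flatMap_map]
      have hfun : (fun t : Nat => rowS a (k + Nat.succ t)) = (fun t => rowS a (k + 1 + t)) := by
        funext t
        congr 1
        omega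
      rw [hfun]
      simp

lemma flatMap_singleton_map {α β : Type} (f : α → β) (l : List α) :
    l.flatMap (fun x => [f x]) = l.map f := by
  induction l with
  | nil => rfl
  | cons x xs ih => simp [ih]

lemma foldl_flat {α β : Type} (l : List α) (F : List β → α → List β) (G : α → List β)
    (hF : ∀ b x, x ∈ l → F b x = b ++ G x) (b : List β) :
    l.foldl F b = b ++ l.flatMap G := by
  induction l generalizing b with
  | nil => simp
  | cons x xs ih =>
    rw [List.foldl_cons, hF b x (by simp),
        ih (fun b y hy => hF b y (by simp [hy])) (b ++ G x)]
    simp [List.flatMap_cons]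

lemma transform_eq (a : List Int) :
    transform a = (List.range a.length).flatMap (fun k => if k = 0 then [] else rowS a k) := by
  unfold transform
  rw [PySem.List.len_eq, PySem.List.pyRange_zero_natCast, List.foldl_map]
  rw [foldl_flat _ _ (fun k => if k = 0 then [] else rowS a k) ?_ []]
  · simp
  intro b k hk
  rw [List.mem_range] at hk
  show _ = b ++ (if k = 0 then [] else rowS a k)
  rw [foldl_flat _ _
      (fun j => if PySem.List.slice a (some j) (some ((k : Int) + j)) ≠ [] then
          [(PySem.List.max? (PySem.List.slice a (some j) (some ((k : Int) + j))) id).getD 0]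
        else []) ?_ b]
  · congr 1
    by_cases hk0 : k = 0
    · subst hk0
      apply List.flatMap_eq_nil_iff.2
      intro j hj
      have hj0 : 0 ≤ j := by
        have := (PySem.List.mem_pyRange_one).1 hj
        exact this.1
      have hsl : PySem.List.slice a (some j) (some j) = [] := by
        rw [PySem.List.slice_toNat a hj0 hj0]
        simp
      simp only [Nat.cast_zero, zero_add]
      simp [hsl]
    · rw [if_neg hk0]
      have hk1 : 1 ≤ k := Nat.one_le_iff_ne_zero.2 hk0
      have hb : ((a.length : Int)) - (k : Int) - 1 = ((a.length - k - 1 : Nat) : Int) := by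
        omega
      rw [hb, PySem.List.pyRange_zero_natCast, List.flatMap_map]
      refine (List.flatMap_congr (g := fun j => [winMax a j k]) ?_).trans ?_
      · intro j hj
        rw [List.mem_range] at hj
        have hsl : PySem.List.slice a (some ((j : Nat) : Int)) (some ((k : Int) + (j : Int)))
            = (a.drop j).take k := by
          rw [add_comm ((k : Int)) ((j : Int))]
          exact PySem.List.slice_natCast_add a j k
        have hne : (a.drop j).take k ≠ [] := by
          have hlen : ((a.drop j).take k).length = min k (a.length - j) := by simp
          intro hc
          rw [hc] at hlen
          simp at hlen
          omega
        simp only [hsl, ne_eq, hne, not_false_iff, if_true]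
        rfl
      · rw [flatMap_singleton_map]
        rfl
  · intro b' j _
    simp only []
    split_ifs <;> simp

-- ===== VERDICT (by name: the statement is the Claim_ definition above) =====
theorem transform_spec : Claim_equal_transform := by
  intro a _
  unfold Spec_transform transform_alt
  rw [PySem.List.len_eq]
  show transform a = transformAltLoop a
      (if 2 ≤ ((a.length : Int)) then PySem.List.slice a none (some ((a.length : Int) - 2)) else []) 1 []
  by_cases h2 : 2 ≤ a.length
  · rw [if_pos (by exact_mod_cast h2)]
    have hsl : PySem.List.slice a none (some ((a.length : Int) - 2)) = a.take (a.length - 2) := by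
      have hnn : (0 : Int) ≤ (a.length : Int) - 2 := by omega
      rw [PySem.List.slice_to a hnn]
      congr 1
      omega
    rw [hsl, take_eq_rowS_one]
    have h1 : (1 : Int) = ((1 : Nat) : Int) := rfl
    rw [h1, altLoop_eq a (a.length - 1) 1 le_rfl (by omega) []]
    rw [transform_eq]
    have hr : List.range a.length = 0 :: (List.range (a.length - 1)).map Nat.succ := by
      have h : a.length = (a.length - 1) + 1 := by omega
      conv_lhs => rw [h, List.range_succ_eq_map]
    rw [hr, List.flatMap_cons, List.flatMap_map]
    simp only [reduceIte, List.nil_append]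
    apply List.flatMap_congr
    intro t _
    simp [Nat.add_comm]
  · rw [if_neg (by exact_mod_cast h2)]
    rw [transformAltLoop]
    simp only [dite_true]
    rw [transform_eq]
    apply List.flatMap_eq_nil_iff.2
    intro k hk
    rw [List.mem_range] at hk
    have : k = 0 := by omega
    simp [this]
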